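-- pv_equiv track=rewrite | github.com/aditya-2703/DSA | COUNT_SUBSEQUENCE_ABC.PY | is_perfect_sequence
-- ===== SOURCE A (Python) =====
-- def is_perfect_sequence(string):
--     if not string:
--         return False
--     char = string[0]
--     if "a" in string and "b" in string and "c" in string:
--         for i in range(1,len(string)):
--             if ord(char)<=ord(string[i]):
--                 char = string[i]
--                 continue
--             else:
--                 return False
--         return True
--     else:
--         return False
-- ===== SOURCE B (Python) =====
-- def is_perfect_sequence(string):
--     return (bool(string)
--             and "a" in string and "b" in string and "c" in string
--             and string == "".join(sorted(string)))
-- ===== Notes on version B (the rewrite author's own statement) =====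
-- stated objective: idiomatic
-- what changed: Replaced the explicit index loop carrying the previous character with a single boolean conjunction whose monotonicity test is a sort-then-compare: the string equals the join of its sorted characters.
import Mathlib
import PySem

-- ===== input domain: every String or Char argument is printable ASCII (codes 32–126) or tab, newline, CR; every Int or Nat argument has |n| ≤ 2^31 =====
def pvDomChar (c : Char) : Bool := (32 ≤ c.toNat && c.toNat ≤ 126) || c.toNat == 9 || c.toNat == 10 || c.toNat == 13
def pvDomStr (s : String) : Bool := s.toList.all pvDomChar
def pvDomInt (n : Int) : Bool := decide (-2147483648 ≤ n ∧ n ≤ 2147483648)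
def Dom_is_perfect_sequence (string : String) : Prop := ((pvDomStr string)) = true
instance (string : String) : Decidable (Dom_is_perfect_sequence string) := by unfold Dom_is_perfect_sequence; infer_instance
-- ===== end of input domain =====

-- B replaces A's explicit index loop (carrying the previous character) with a
-- sort-then-compare monotonicity test (string == ''.join(sorted(string))); idiomatic, same result.


-- ===== PORT A =====
-- the for-loop over range(1, len(string)): carries 'char' (the previous character),
-- compares ord(char) <= ord(string[i]) and returns False on the first descent
def pvLoopA (char : Char) : List Char → Bool
  | [] => true
  | c :: rest => if char.toNat ≤ c.toNat then pvLoopA c rest else false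

def is_perfect_sequence (string : String) : Bool :=
  match string.toList with
  | [] => false                 -- if not string: return False
  | c0 :: rest =>               -- char = string[0]
      if PySem.Str.isIn "a" string && PySem.Str.isIn "b" string && PySem.Str.isIn "c" string then
        pvLoopA c0 rest
      else
        false

-- ===== PORT B =====
-- 'string == "".join(sorted(string))' : joining the sorted character list back into a
-- string and comparing equals comparing the character list with its sorted form.
def is_perfect_sequence_alt (string : String) : Bool :=
  !string.toList.isEmpty
    && PySem.Str.isIn "a" string && PySem.Str.isIn "b" string && PySem.Str.isIn "c" string
    && (string.toList == PySem.List.sorted string.toList (fun x => x) false)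

-- ===== PRECONDITION & SPEC =====
def Spec_is_perfect_sequence (string : String) (out : Bool) : Prop := out = is_perfect_sequence_alt string
instance (string : String) (out : Bool) : Decidable (Spec_is_perfect_sequence string out) := by unfold Spec_is_perfect_sequence; infer_instance

-- ===== CLAIM (what is proved, stated in full; the proofs are below) =====
def Claim_equal_is_perfect_sequence : Prop := ∀ (string : String), Dom_is_perfect_sequence string → Spec_is_perfect_sequence string (is_perfect_sequence string)

-- ===== LEMMAS AND PROOFS =====

-- A's loop accepts exactly the lists whose chain from 'char' is non-decreasing
theorem pvLoopA_iff_chain (l : List Char) (char : Char) :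
    pvLoopA char l = true ↔ List.IsChain (· ≤ ·) (char :: l) := by
  induction l generalizing char with
  | nil => simp [pvLoopA]
  | cons c rest ih =>
      simp only [pvLoopA, List.isChain_cons_cons]
      by_cases h : char.toNat ≤ c.toNat
      · simp only [if_pos h, ih]
        have : char ≤ c := by
          rw [Char.le_def, UInt32.le_iff_toNat_le]; exact h
        simp [this]
      · have : ¬ char ≤ c := by
          rw [Char.le_def, UInt32.le_iff_toNat_le]; exact h
        simp [if_neg h, this]

-- a list equals its (identity-key) Python sort iff it is non-decreasing
theorem sorted_id_eq_self_iff (cs : List Char) :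
    PySem.List.sorted cs (fun x => x) false = cs ↔ cs.Pairwise (· ≤ ·) := by
  constructor
  · intro h
    have hp := PySem.List.sorted_pairwise (xs := cs) (key := fun x => x)
    rw [h] at hp
    exact hp
  · intro h
    exact PySem.List.sorted_eq_self_of_pairwise cs (fun x => x) h

-- the sorted-equality test computes exactly what A's loop computes
theorem beq_sorted_eq_loop (c0 : Char) (rest : List Char) :
    (c0 :: rest == PySem.List.sorted (c0 :: rest) (fun x => x) false) = pvLoopA c0 rest := by
  rcases hb : pvLoopA c0 rest with _ | _
  · rw [beq_eq_false_iff_ne]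
    intro he
    have hp : (c0 :: rest).Pairwise (· ≤ ·) := (sorted_id_eq_self_iff _).mp he.symm
    have hc : List.IsChain (· ≤ ·) (c0 :: rest) := List.isChain_iff_pairwise.mpr hp
    rw [(pvLoopA_iff_chain rest c0).mpr hc] at hb
    exact Bool.noConfusion hb
  · have hc : List.IsChain (· ≤ ·) (c0 :: rest) := (pvLoopA_iff_chain rest c0).mp hb
    have hp := List.isChain_iff_pairwise.mp hc
    simp [((sorted_id_eq_self_iff (c0 :: rest)).mpr hp)]

theorem ports_agree (string : String) :
    is_perfect_sequence string = is_perfect_sequence_alt string := by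
  unfold is_perfect_sequence is_perfect_sequence_alt
  cases h : string.toList with
  | nil => simp
  | cons c0 rest =>
      simp only [List.isEmpty_cons, Bool.not_false, Bool.true_and]
      cases hm : (PySem.Str.isIn "a" string && PySem.Str.isIn "b" string && PySem.Str.isIn "c" string) with
      | false => simp
      | true =>
          simp only [if_true, Bool.true_and]
          exact (beq_sorted_eq_loop c0 rest).symm

-- ===== VERDICT (by name: the statement is the Claim_ definition above) =====
theorem is_perfect_sequence_spec : Claim_equal_is_perfect_sequence := by
  intro s _
  unfold Spec_is_perfect_sequence
  exact ports_agree s
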